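-- pv_equiv track=rewrite | github.com/RhDm/dogsled | dogsled/normaliser.py | slice_points
-- ===== SOURCE A (Python) =====
-- from typing import Optional, Union, Any, Tuple, List
--
-- def slice_points(slide_width_px: int, slide_height_px: int,
--                  mn: Tuple[int, int]) -> List[Tuple[Tuple[int, int],
--                                                     Tuple[int, int]]]:
--     """Create a list of tuples with coordinates at which the sldide is sliced
--     coordinates defined in row - column order
--     return a list of tuples containing tuples:
--                                     - location of the slice
--                                     - size of the slice.
--     """
--     # TODO too bruteforcy, should be rewritten
--     m_rows, n_columns = mn
--     cutting_cooridinates = []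
--     column_width_px = slide_width_px // n_columns
--     row_height_px = slide_height_px // m_rows
--
--     for m in range(0, m_rows):
--         for n in range(0, n_columns):
--             location = (n * column_width_px, m * row_height_px)
--             current_width_px, current_height_px = column_width_px, row_height_px
--             if n == (n_columns - 1):  # last column gets the rest of the slide
--                 current_width_px = slide_width_px - n * column_width_px
--             if m == (m_rows - 1):  # last row gets the rest of the slide
--                 current_height_px = slide_height_px - m * row_height_px
--             size = (current_width_px, current_height_px)
--             cutting_cooridinates.append((location, size))
--     return cutting_cooridinates
-- ===== SOURCE B (Python) =====
-- def slice_points(slide_width_px: int, slide_height_px: int, mn):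
--     """Cut-boundary re-implementation: compute the lists of cut positions
--     along each axis (including the far edge), then pair adjacent boundaries
--     so each tile's size is the difference of consecutive cuts -- no per-cell
--     last-row/last-column conditionals anywhere."""
--     m_rows, n_columns = mn
--     x_cuts = [n * (slide_width_px // n_columns) for n in range(n_columns)] + [slide_width_px]
--     y_cuts = [m * (slide_height_px // m_rows) for m in range(m_rows)] + [slide_height_px]
--     return [((x, y), (x2 - x, y2 - y))
--             for y, y2 in zip(y_cuts, y_cuts[1:])
--             for x, x2 in zip(x_cuts, x_cuts[1:])]
-- ===== Notes on version B (the rewrite author's own statement) =====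
-- stated objective: alternative
-- what changed: B computes sizes as differences of adjacent cut boundaries: it builds the lists of cut positions along each axis (including the far edge) and pairs consecutive boundaries with zip, so no per-cell last-row/last-column conditionals and no width/height variables exist at all.
import Mathlib
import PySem

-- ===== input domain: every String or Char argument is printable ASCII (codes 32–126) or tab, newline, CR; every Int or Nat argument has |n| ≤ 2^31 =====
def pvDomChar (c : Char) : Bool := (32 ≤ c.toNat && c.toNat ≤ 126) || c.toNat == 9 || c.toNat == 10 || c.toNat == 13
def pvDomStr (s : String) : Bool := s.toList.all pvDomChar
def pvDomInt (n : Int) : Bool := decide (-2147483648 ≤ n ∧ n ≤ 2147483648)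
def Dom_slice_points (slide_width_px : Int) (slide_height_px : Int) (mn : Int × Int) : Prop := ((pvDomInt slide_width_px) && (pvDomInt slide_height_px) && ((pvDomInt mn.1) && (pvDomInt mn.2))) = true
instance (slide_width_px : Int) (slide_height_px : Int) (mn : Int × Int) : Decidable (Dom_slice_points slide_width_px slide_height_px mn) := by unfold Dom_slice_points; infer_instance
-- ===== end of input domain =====

-- B computes tile sizes as differences of adjacent cut boundaries (axis cut
-- lists zipped pairwise) instead of A's per-cell last-row/last-column
-- conditionals (objective: alternative).

-- ===== PORT A =====
def slice_points (slide_width_px : Int) (slide_height_px : Int) (mn : Int × Int) : List ((Int × Int) × (Int × Int)) :=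
  let m_rows := mn.1
  let n_columns := mn.2
  let column_width_px := PySem.Int.floordiv slide_width_px n_columns
  let row_height_px := PySem.Int.floordiv slide_height_px m_rows
  (PySem.List.pyRange 0 m_rows 1).foldl (fun acc m =>
    (PySem.List.pyRange 0 n_columns 1).foldl (fun acc n =>
      let location := (n * column_width_px, m * row_height_px)
      let current_width_px := if n = n_columns - 1 then slide_width_px - n * column_width_px else column_width_px
      let current_height_px := if m = m_rows - 1 then slide_height_px - m * row_height_px else row_height_px
      acc ++ [(location, (current_width_px, current_height_px))]) acc) []

-- ===== PORT B =====
-- Python xs[1:] on a list is exactly List.drop 1 (nonnegative start slice).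
def slice_points_alt (slide_width_px : Int) (slide_height_px : Int) (mn : Int × Int) : List ((Int × Int) × (Int × Int)) :=
  let m_rows := mn.1
  let n_columns := mn.2
  let x_cuts : List Int := (PySem.List.pyRange 0 n_columns 1).map (fun n => n * PySem.Int.floordiv slide_width_px n_columns) ++ [slide_width_px]
  let y_cuts : List Int := (PySem.List.pyRange 0 m_rows 1).map (fun m => m * PySem.Int.floordiv slide_height_px m_rows) ++ [slide_height_px]
  (y_cuts.zip (y_cuts.drop 1)).flatMap (fun yp =>
    (x_cuts.zip (x_cuts.drop 1)).map (fun xp =>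
      ((xp.1, yp.1), (xp.2 - xp.1, yp.2 - yp.1))))

-- ===== PRECONDITION & SPEC =====
-- Pre_ excludes exactly the inputs where A raises ZeroDivisionError (zero row or column count).
def Pre_slice_points (slide_width_px : Int) (slide_height_px : Int) (mn : Int × Int) : Prop := mn.1 ≠ 0 ∧ mn.2 ≠ 0
instance (slide_width_px : Int) (slide_height_px : Int) (mn : Int × Int) : Decidable (Pre_slice_points slide_width_px slide_height_px mn) := by unfold Pre_slice_points; infer_instance
def pvWitness_slice_points : Int × Int × (Int × Int) := (10, 8, (2, 3))
def Spec_slice_points (slide_width_px : Int) (slide_height_px : Int) (mn : Int × Int) (out : List ((Int × Int) × (Int × Int))) : Prop := out = slice_points_alt slide_width_px slide_height_px mn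
instance (slide_width_px : Int) (slide_height_px : Int) (mn : Int × Int) (out : List ((Int × Int) × (Int × Int))) : Decidable (Spec_slice_points slide_width_px slide_height_px mn out) := by unfold Spec_slice_points; infer_instance

-- ===== CLAIM (what is proved, stated in full; the proofs are below) =====
def Claim_equal_slice_points : Prop := ∀ (slide_width_px : Int) (slide_height_px : Int) (mn : Int × Int), Dom_slice_points slide_width_px slide_height_px mn → Pre_slice_points slide_width_px slide_height_px mn → Spec_slice_points slide_width_px slide_height_px mn (slice_points slide_width_px slide_height_px mn)

-- ===== LEMMAS AND PROOFS =====

-- Adjacent-pair zip of a cut list '(map f (pyRange a c 1)) ++ [e]' is the map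
-- sending each n to (f n, next boundary), where the last n gets e.
theorem zip_adjacent_cuts (f : Int → Int) (e : Int) :
    ∀ (k : Nat) (a c : Int), (c - a).toNat = k →
    ((PySem.List.pyRange a c 1).map f ++ [e]).zip
      (((PySem.List.pyRange a c 1).map f ++ [e]).drop 1)
    = (PySem.List.pyRange a c 1).map (fun n => (f n, if n = c - 1 then e else f (n + 1))) := by
  intro k
  induction k with
  | zero =>
    intro a c h
    have hac : c ≤ a := by omega
    rw [PySem.List.pyRange_one_eq_nil hac]
    rfl
  | succ k ih =>
    intro a c h
    have hac : a < c := by omega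
    rw [PySem.List.pyRange_one_cons hac]
    by_cases h2 : a + 1 < c
    · have := ih (a + 1) c (by omega)
      rw [PySem.List.pyRange_one_cons h2] at this ⊢
      simp only [List.map_cons, List.cons_append, List.drop_succ_cons, List.drop_zero,
        List.zip_cons_cons] at this ⊢
      rw [this]
      have hne : a ≠ c - 1 := by omega
      simp [hne]
    · have hc1 : c = a + 1 := by omega
      subst hc1
      rw [PySem.List.pyRange_one_eq_nil (by omega : (a:Int) + 1 ≤ a + 1)]
      simp

theorem slice_points_spec : Claim_equal_slice_points := by
  intro sw sh mn _ _
  unfold Spec_slice_points slice_points slice_points_alt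
  simp only
  set cw := PySem.Int.floordiv sw mn.2 with hcw
  set rh := PySem.Int.floordiv sh mn.1 with hrh
  -- A's inner foldl appending singletons = acc ++ map
  have inner : ∀ (m : Int) (acc : List ((Int × Int) × (Int × Int))),
      (PySem.List.pyRange 0 mn.2 1).foldl (fun acc n =>
        acc ++ [((n * cw, m * rh),
                 ((if n = mn.2 - 1 then sw - n * cw else cw),
                  (if m = mn.1 - 1 then sh - m * rh else rh)))]) acc
      = acc ++ ((PySem.List.pyRange 0 mn.2 1).map (fun n =>
          ((n * cw, m * rh),
           ((if n = mn.2 - 1 then sw - n * cw else cw),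
            (if m = mn.1 - 1 then sh - m * rh else rh))))) := by
    intro m acc
    rw [PySem.List.foldl_append_eq_flatMap]
    congr 1
    induction (PySem.List.pyRange 0 mn.2 1) with
    | nil => rfl
    | cons a t ih => simp [ih]
  have hx := zip_adjacent_cuts (fun n => n * cw) sw (mn.2 - 0).toNat 0 mn.2 (by omega)
  have hy := zip_adjacent_cuts (fun m => m * rh) sh (mn.1 - 0).toNat 0 mn.1 (by omega)
  simp only at hx hy
  calc
    (PySem.List.pyRange 0 mn.1 1).foldl (fun acc m =>
      (PySem.List.pyRange 0 mn.2 1).foldl (fun acc n =>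
        acc ++ [((n * cw, m * rh),
                 ((if n = mn.2 - 1 then sw - n * cw else cw),
                  (if m = mn.1 - 1 then sh - m * rh else rh)))]) acc) []
      = (PySem.List.pyRange 0 mn.1 1).foldl (fun acc m =>
          acc ++ ((PySem.List.pyRange 0 mn.2 1).map (fun n =>
            ((n * cw, m * rh),
             ((if n = mn.2 - 1 then sw - n * cw else cw),
              (if m = mn.1 - 1 then sh - m * rh else rh)))))) [] := by
        apply PySem.List.foldl_congr_mem
        intro acc m _
        exact inner m acc
    _ = (PySem.List.pyRange 0 mn.1 1).flatMap (fun m =>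
          (PySem.List.pyRange 0 mn.2 1).map (fun n =>
            ((n * cw, m * rh),
             ((if n = mn.2 - 1 then sw - n * cw else cw),
              (if m = mn.1 - 1 then sh - m * rh else rh))))) := by
        rw [PySem.List.foldl_append_eq_flatMap]; simp
    _ = _ := by
        rw [hx, hy, List.flatMap_map]
        apply List.flatMap_congr
        intro m _
        rw [List.map_map]
        apply List.map_congr_left
        intro n _
        simp only [Function.comp]
        by_cases hn : n = mn.2 - 1 <;> by_cases hm : m = mn.1 - 1 <;>
          simp [hn, hm, add_mul]
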